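-- pv_equiv track=rewrite | github.com/posl/comment_recommendation | script/split_gen/1_time/ja/135_D/0.py | solve
-- ===== SOURCE A (Python) =====
-- def solve(s):
--     dp = [[0 for _ in range(13)] for _ in range(len(s)+1)]
--     dp[0][0] = 1
--     for i in range(len(s)):
--         for j in range(13):
--             if s[i] == "?":
--                 for k in range(10):
--                     dp[i+1][(j*10+k)%13] += dp[i][j]
--             else:
--                 dp[i+1][(j*10+int(s[i]))%13] += dp[i][j]
--         for j in range(13):
--             dp[i+1][j] %= 10**9+7
--     return dp[len(s)][5]
-- ===== SOURCE B (Python) =====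
-- def solve(s):
--     MOD = 10 ** 9 + 7
--     # positional weights from the right: weights[i] = 10**(len(s)-1-i) % 13
--     weights = []
--     w = 1
--     for _ in s:
--         weights.append(w)
--         w = w * 10 % 13
--     weights.reverse()
--     fixed = 0               # residue contributed by the fixed digits
--     cnt = [1] + [0] * 12    # cnt[r] = #fillings of the '?' seen so far with weighted sum ≡ r (mod 13)
--     for c, w in zip(s, weights):
--         if c == '?':
--             new = [0] * 13
--             for r in range(13):
--                 for d in range(10):
--                     t = (r + d * w) % 13
--                     new[t] = (new[t] + cnt[r]) % MOD
--             cnt = new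
--         else:
--             fixed = (fixed + int(c) * w) % 13
--     return cnt[(5 - fixed) % 13]
-- ===== Notes on version B (the rewrite author's own statement) =====
-- stated objective: alternative
-- what changed: Replaces the full (n+1)x13 Horner-style DP table over every character by a single 13-entry count vector updated only at '?' positions, folding the fixed digits into one precomputed weighted residue (weights 10^(n-1-i) mod 13 from the right) and reading the answer at index (5-fixed) mod 13.
import Mathlib
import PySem

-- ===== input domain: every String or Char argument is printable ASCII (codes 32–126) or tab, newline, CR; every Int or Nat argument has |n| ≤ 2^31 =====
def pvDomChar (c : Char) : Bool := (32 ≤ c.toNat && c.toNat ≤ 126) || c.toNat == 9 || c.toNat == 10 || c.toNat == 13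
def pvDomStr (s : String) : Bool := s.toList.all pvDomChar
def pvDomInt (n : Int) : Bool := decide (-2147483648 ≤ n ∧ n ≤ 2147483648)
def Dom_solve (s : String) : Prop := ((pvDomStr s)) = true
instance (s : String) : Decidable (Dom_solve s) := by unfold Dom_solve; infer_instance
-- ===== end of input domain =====

-- B replaces A's full Horner-style DP over every character by one 13-entry count vector
-- updated only at '?' positions, folding the fixed digits into a precomputed weighted
-- residue (weights 10^(n-1-i) mod 13 from the right); objective: alternative algorithm.

-- ===== PORT A =====

def MODP : Int := 10 ^ 9 + 7

-- int(s[i]) for a single character; Python raises ValueError on non-digit chars,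
-- which Pre_solve excludes (PySem.Int.ofStr? returns none exactly there).
def digitA (c : Char) : Nat := ((PySem.Int.ofStr? (String.ofList [c])).getD 0).toNat

-- one iteration of A's outer loop: build row i+1 from row i, then `dp[i+1][j] %= 10**9+7`
def rowStepA (row : List Int) (c : Char) : List Int :=
  let next := (List.range 13).foldl (fun acc j =>
    if c = '?' then
      (List.range 10).foldl (fun acc2 k =>
        acc2.set ((j * 10 + k) % 13) (acc2.getD ((j * 10 + k) % 13) 0 + row.getD j 0)) acc
    else
      acc.set ((j * 10 + digitA c) % 13)
        (acc.getD ((j * 10 + digitA c) % 13) 0 + row.getD j 0))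
    (List.replicate 13 (0 : Int))
  next.map (fun x => x % MODP)

-- A keeps the whole dp table but row i+1 only reads row i; the fold carries the current row.
def solve (s : String) : Int :=
  (s.toList.foldl rowStepA ((List.replicate 13 (0 : Int)).set 0 1)).getD 5 0

-- ===== PORT B =====

-- weights[i] = 10^(len-1-i) mod 13: built ascending by repeated *10 %13, then reversed
def buildWeights (s : String) : List Nat :=
  ((s.toList.foldl (fun (p : List Nat × Nat) _ => (p.1 ++ [p.2], p.2 * 10 % 13)) ([], 1)).1).reverse

-- one iteration of B's loop over (character, weight) pairs
def stepB (st : Nat × List Int) (cw : Char × Nat) : Nat × List Int :=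
  if cw.1 = '?' then
    (st.1,
     (List.range 13).foldl (fun acc r =>
       (List.range 10).foldl (fun acc2 d =>
         acc2.set ((r + d * cw.2) % 13)
           ((acc2.getD ((r + d * cw.2) % 13) 0 + st.2.getD r 0) % MODP)) acc)
       (List.replicate 13 (0 : Int)))
  else
    ((st.1 + digitA cw.1 * cw.2) % 13, st.2)

def solve_alt (s : String) : Int :=
  let res := (s.toList.zip (buildWeights s)).foldl stepB (0, (List.replicate 13 (0 : Int)).set 0 1)
  -- Python's (5 - fixed) % 13: nonnegative since the divisor is positive, same as Int.emod
  res.2.getD ((5 - (res.1 : Int)) % 13).toNat 0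

-- ===== PRECONDITION & SPEC =====

-- Pre_ excludes exactly the inputs where A raises ValueError: a character that is
-- neither '?' nor an ASCII digit makes int(s[i]) raise (B raises there too).
def Pre_solve (s : String) : Prop :=
  (s.toList.all (fun c => c == '?' || (48 ≤ c.toNat && c.toNat ≤ 57))) = true
instance (s : String) : Decidable (Pre_solve s) := by unfold Pre_solve; infer_instance

def pvWitness_solve : String := "7?3"

def Spec_solve (s : String) (out : Int) : Prop := out = solve_alt s
instance (s : String) (out : Int) : Decidable (Spec_solve s out) := by unfold Spec_solve; infer_instance

-- ===== CLAIM (what is proved, stated in full; the proofs are below) =====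
def Claim_equal_solve : Prop := ∀ (s : String), Dom_solve s → Pre_solve s → Spec_solve s (solve s)

-- ===== LEMMAS AND PROOFS =====

-- read a 13-entry vector at a ZMod 13 index
def rget (l : List Int) (r : ZMod 13) : Int := l.getD r.val 0

-- ascending weights and the descending weight list [10^(n-1) % 13, …, 10^0 % 13]
def pw (e : Nat) : Nat := 10 ^ e % 13
def wl (n : Nat) : List Nat := ((List.range n).map pw).reverse

-- a single `acc[i] = op acc[i] v` update
def upd (op : Int → Int → Int) (acc : List Int) (u : Nat × Int) : List Int :=
  acc.set u.1 (op (acc.getD u.1 0) u.2)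

lemma getD_set_lt (l : List Int) (i j : Nat) (a : Int) (h : i < l.length) :
    (l.set i a).getD j 0 = if i = j then a else l.getD j 0 := by
  simp [List.getD_eq_getElem?_getD, List.getElem?_set, h]; split <;> simp_all

lemma length_foldl_upd (op : Int → Int → Int) (ups : List (Nat × Int)) (init : List Int) :
    (ups.foldl (upd op) init).length = init.length := by
  induction ups generalizing init with
  | nil => rfl
  | cons u tl ih => rw [List.foldl_cons, ih]; simp [upd]

lemma getD_foldl_upd (op : Int → Int → Int) (ups : List (Nat × Int)) (init : List Int) (t : Nat)
    (h : ∀ u ∈ ups, u.1 < init.length) (ht : t < init.length) :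
    (ups.foldl (upd op) init).getD t 0
      = ((ups.filter (fun u => decide (u.1 = t))).map Prod.snd).foldl op (init.getD t 0) := by
  induction ups generalizing init with
  | nil => rfl
  | cons u tl ih =>
    have hu : u.1 < init.length := h u (List.mem_cons_self ..)
    have hlen : (upd op init u).length = init.length := by simp [upd]
    have h' : ∀ v ∈ tl, v.1 < (upd op init u).length := fun v hv => by
      rw [hlen]; exact h v (List.mem_cons_of_mem _ hv)
    rw [List.foldl_cons, ih _ h' (by rw [hlen]; exact ht)]
    by_cases hc : u.1 = t
    · subst hc
      rw [List.filter_cons_of_pos (by simp), List.map_cons, List.foldl_cons]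
      congr 1
      rw [upd, getD_set_lt _ _ _ _ hu, if_pos rfl]
    · rw [List.filter_cons_of_neg (by simp [hc])]
      congr 1
      rw [upd, getD_set_lt _ _ _ _ hu, if_neg hc]

lemma foldl_add_eq (l : List Int) (a : Int) : l.foldl (fun x v => x + v) a = a + l.sum := by
  induction l generalizing a with
  | nil => simp
  | cons x xs ih => simp [List.foldl_cons, ih, add_assoc]

lemma foldl_modadd (l : List Int) (a : Int) :
    l.foldl (fun x v => (x + v) % MODP) (a % MODP) = (a + l.sum) % MODP := by
  induction l generalizing a with
  | nil => simp
  | cons x xs ih =>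
    rw [List.foldl_cons, Int.emod_add_emod, ih, List.sum_cons, add_assoc]

lemma sum_filterMap_range (f : Nat → Nat) (v : Nat → Int) (N t : Nat) :
    ((((List.range N).map (fun k => (f k, v k))).filter (fun u => decide (u.1 = t))).map
      Prod.snd).sum = ∑ k ∈ Finset.range N, if f k = t then v k else 0 := by
  induction N with
  | zero => rfl
  | succ n ih =>
    rw [List.range_succ, List.map_append, List.filter_append, List.map_append, List.sum_append,
      ih, Finset.sum_range_succ]
    by_cases h : f n = t <;> simp [h]

lemma sum_filterMap_flatMap (g : Nat → List (Nat × Int)) (p : Nat × Int → Bool) (N : Nat) :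
    ((((List.range N).flatMap g).filter p).map Prod.snd).sum
      = ∑ j ∈ Finset.range N, (((g j).filter p).map Prod.snd).sum := by
  induction N with
  | zero => rfl
  | succ n ih =>
    rw [List.range_succ, List.flatMap_append, List.filter_append, List.map_append,
      List.sum_append, ih, Finset.sum_range_succ]
    simp

lemma sum_range13_zmod (F : Nat → Int) :
    (∑ j ∈ Finset.range 13, F j) = ∑ x : ZMod 13, F x.val := by
  rw [← Fin.sum_univ_eq_sum_range]
  rfl

-- solving j*10 + c = t in ZMod 13 (4 is the inverse of 10)
lemma zmod_lin (x t c : ZMod 13) : (x * 10 + c = t) ↔ (x = (t - c) * 4) := by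
  constructor
  · intro h
    have h1 : x * 10 = t - c := eq_sub_of_add_eq h
    calc x = (x * 10) * 4 := by
            rw [mul_assoc, show ((10 : ZMod 13) * 4) = 1 by decide, mul_one]
      _ = (t - c) * 4 := by rw [h1]
  · intro h
    subst h
    calc (t - c) * 4 * 10 + c = (t - c) * (4 * 10) + c := by ring
      _ = t := by rw [show ((4 : ZMod 13) * 10) = 1 by decide]; ring

lemma cond_iff (x : Nat) (t : ZMod 13) : (x % 13 = t.val) ↔ ((x : ZMod 13) = t) := by
  constructor
  · intro h; rw [← ZMod.natCast_mod x 13, h, ZMod.natCast_val, ZMod.cast_id]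
  · intro h; rw [← h, ZMod.val_natCast]

lemma val_cast_zmod (x : ZMod 13) : ((x.val : Nat) : ZMod 13) = x := by
  rw [ZMod.natCast_val, ZMod.cast_id]

lemma MODP_pos : 0 < MODP := by unfold MODP; norm_num

lemma foldl_modadd0 (l : List Int) :
    l.foldl (fun x v => (x + v) % MODP) 0 = l.sum % MODP := by
  have h := foldl_modadd l 0
  rw [Int.zero_emod] at h
  rw [h, zero_add]

-- ---- characterizations of the '?' and digit steps of both ports ----

lemma rowStepA_q_eq (row : List Int) :
    rowStepA row '?' =
      (((List.range 13).flatMap fun j => (List.range 10).map fun k =>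
          ((j * 10 + k) % 13, row.getD j 0)).foldl (upd (fun x v => x + v))
        (List.replicate 13 (0 : Int))).map (fun x => x % MODP) := by
  rw [rowStepA, List.foldl_flatMap]
  simp [List.foldl_map, upd]

lemma rowStepA_d_eq (row : List Int) (c : Char) (hc : ¬ c = '?') :
    rowStepA row c =
      (((List.range 13).map fun j =>
          ((j * 10 + digitA c) % 13, row.getD j 0)).foldl (upd (fun x v => x + v))
        (List.replicate 13 (0 : Int))).map (fun x => x % MODP) := by
  rw [rowStepA]
  simp [List.foldl_map, upd, hc]

lemma stepB_q_eq (fixed : Nat) (cnt : List Int) (w : Nat) :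
    (stepB (fixed, cnt) ('?', w)).2 =
      ((List.range 13).flatMap fun r => (List.range 10).map fun d =>
          ((r + d * w) % 13, cnt.getD r 0)).foldl (upd (fun x v => (x + v) % MODP))
        (List.replicate 13 (0 : Int)) := by
  rw [stepB]
  simp [List.foldl_flatMap, List.foldl_map, upd]

lemma stepB_q_len (fixed : Nat) (cnt : List Int) (w : Nat) :
    (stepB (fixed, cnt) ('?', w)).2.length = 13 := by
  rw [stepB_q_eq, length_foldl_upd, List.length_replicate]

lemma rget_map_mod (l : List Int) (h : l.length = 13) (t : ZMod 13) :
    rget (l.map (fun x => x % MODP)) t = (rget l t) % MODP := by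
  have hv : t.val < l.length := by rw [h]; exact ZMod.val_lt t
  simp [rget, List.getD_eq_getElem?_getD, List.getElem?_eq_getElem hv,
    List.getElem?_eq_getElem (by simpa using hv : t.val < (l.map (fun x => x % MODP)).length)]

lemma rget_foldl_upd (op : Int → Int → Int) (ups : List (Nat × Int))
    (h : ∀ u ∈ ups, u.1 < 13) (t : ZMod 13) :
    rget (ups.foldl (upd op) (List.replicate 13 (0 : Int))) t
      = ((ups.filter (fun u => decide (u.1 = t.val))).map Prod.snd).foldl op 0 := by
  rw [rget, getD_foldl_upd _ _ _ _ (by simpa using h) (by simpa using ZMod.val_lt t)]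
  have h0 : (List.replicate 13 (0 : Int)).getD t.val 0 = 0 := by
    rw [List.getD_eq_getElem?_getD, List.getElem?_replicate]
    split <;> rfl
  rw [h0]

lemma rowStepA_q_rget (row : List Int) (t : ZMod 13) :
    rget (rowStepA row '?') t
      = (∑ k ∈ Finset.range 10, rget row ((t - (k : ZMod 13)) * 4)) % MODP := by
  rw [rowStepA_q_eq, rget_map_mod _ (by rw [length_foldl_upd, List.length_replicate]),
    rget_foldl_upd _ _ (by
      intro u hu
      simp only [List.mem_flatMap, List.mem_map, List.mem_range] at hu
      obtain ⟨j, hj, k, hk, rfl⟩ := hu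
      omega), foldl_add_eq, zero_add,
    sum_filterMap_flatMap]
  have hin : ∀ j ∈ Finset.range 13,
      ((((List.range 10).map fun k => ((j * 10 + k) % 13, row.getD j 0)).filter
          (fun u => decide (u.1 = t.val))).map Prod.snd).sum
        = ∑ k ∈ Finset.range 10, if (j * 10 + k) % 13 = t.val then row.getD j 0 else 0 :=
    fun j _ => sum_filterMap_range _ _ _ _
  rw [Finset.sum_congr rfl hin, Finset.sum_comm]
  congr 1
  apply Finset.sum_congr rfl
  intro k _
  rw [sum_range13_zmod (fun j => if (j * 10 + k) % 13 = t.val then row.getD j 0 else 0)]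
  have hc : ∀ x : ZMod 13,
      ((x.val * 10 + k) % 13 = t.val) ↔ (x = (t - (k : ZMod 13)) * 4) := by
    intro x
    rw [cond_iff]
    push_cast [val_cast_zmod]
    exact zmod_lin x t (k : ZMod 13)
  calc (∑ x : ZMod 13, if (x.val * 10 + k) % 13 = t.val then row.getD x.val 0 else 0)
      = ∑ x : ZMod 13, if x = (t - (k : ZMod 13)) * 4 then row.getD x.val 0 else 0 :=
        Finset.sum_congr rfl fun x _ => if_congr (hc x) rfl rfl
    _ = rget row ((t - (k : ZMod 13)) * 4) := by simp [rget]

lemma rowStepA_d_rget (row : List Int) (c : Char) (hc : ¬ c = '?') (t : ZMod 13) :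
    rget (rowStepA row c)
      t = (rget row ((t - (digitA c : ZMod 13)) * 4)) % MODP := by
  rw [rowStepA_d_eq _ _ hc, rget_map_mod _ (by rw [length_foldl_upd, List.length_replicate]),
    rget_foldl_upd _ _ (by
      intro u hu
      simp only [List.mem_map, List.mem_range] at hu
      obtain ⟨j, hj, rfl⟩ := hu
      omega), foldl_add_eq, zero_add,
    sum_filterMap_range, sum_range13_zmod (fun j => if (j * 10 + digitA c) % 13 = t.val
      then row.getD j 0 else 0)]
  have hcnd : ∀ x : ZMod 13,
      ((x.val * 10 + digitA c) % 13 = t.val) ↔ (x = (t - (digitA c : ZMod 13)) * 4) := by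
    intro x
    rw [cond_iff]
    push_cast [val_cast_zmod]
    exact zmod_lin x t ((digitA c : ZMod 13))
  congr 1
  calc (∑ x : ZMod 13, if (x.val * 10 + digitA c) % 13 = t.val then row.getD x.val 0 else 0)
      = ∑ x : ZMod 13, if x = (t - (digitA c : ZMod 13)) * 4 then row.getD x.val 0 else 0 :=
        Finset.sum_congr rfl fun x _ => if_congr (hcnd x) rfl rfl
    _ = _ := by simp [rget]

lemma stepB_q_rget (fixed : Nat) (cnt : List Int) (w : Nat) (t : ZMod 13) :
    rget (stepB (fixed, cnt) ('?', w)).2 t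
      = (∑ d ∈ Finset.range 10, rget cnt (t - (d : ZMod 13) * (w : ZMod 13))) % MODP := by
  rw [stepB_q_eq, rget_foldl_upd _ _ (by
      intro u hu
      simp only [List.mem_flatMap, List.mem_map, List.mem_range] at hu
      obtain ⟨r, hr, d, hd, rfl⟩ := hu
      omega), foldl_modadd0, sum_filterMap_flatMap]
  congr 1
  have hin : ∀ r ∈ Finset.range 13,
      ((((List.range 10).map fun d => ((r + d * w) % 13, cnt.getD r 0)).filter
          (fun u => decide (u.1 = t.val))).map Prod.snd).sum
        = ∑ d ∈ Finset.range 10, if (r + d * w) % 13 = t.val then cnt.getD r 0 else 0 :=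
    fun r _ => sum_filterMap_range _ _ _ _
  rw [Finset.sum_congr rfl hin, Finset.sum_comm]
  apply Finset.sum_congr rfl
  intro d _
  rw [sum_range13_zmod (fun r => if (r + d * w) % 13 = t.val then cnt.getD r 0 else 0)]
  have hcnd : ∀ x : ZMod 13,
      ((x.val + d * w) % 13 = t.val) ↔ (x = t - (d : ZMod 13) * (w : ZMod 13)) := by
    intro x
    rw [cond_iff]
    push_cast [val_cast_zmod]
    exact eq_sub_iff_add_eq.symm
  calc (∑ x : ZMod 13, if (x.val + d * w) % 13 = t.val then cnt.getD x.val 0 else 0)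
      = ∑ x : ZMod 13, if x = t - (d : ZMod 13) * (w : ZMod 13) then cnt.getD x.val 0 else 0 :=
        Finset.sum_congr rfl fun x _ => if_congr (hcnd x) rfl rfl
    _ = _ := by simp [rget]

-- ---- weights ----

lemma pw_cast (n : Nat) : ((pw n : Nat) : ZMod 13) = (10 : ZMod 13) ^ n := by
  rw [pw, ZMod.natCast_mod]
  push_cast
  ring

lemma pw_succ (k : Nat) : pw k * 10 % 13 = pw (k + 1) := by
  rw [pw, pw, pow_succ, Nat.mod_mul_mod]

lemma wl_succ (n : Nat) : wl (n + 1) = pw n :: wl n := by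
  simp [wl, List.range_succ]

lemma buildWeights_eq (s : String) : buildWeights s = wl s.toList.length := by
  have h : ∀ (cs : List Char) (k : Nat),
      cs.foldl (fun (p : List Nat × Nat) _ => (p.1 ++ [p.2], p.2 * 10 % 13))
        ((List.range k).map pw, pw k)
        = ((List.range (k + cs.length)).map pw, pw (k + cs.length)) := by
    intro cs
    induction cs with
    | nil => simp
    | cons c tl ih =>
      intro k
      rw [List.foldl_cons,
        show ((((List.range k).map pw) ++ [pw k], pw k * 10 % 13)
            = ((List.range (k + 1)).map pw, pw (k + 1))) by
          rw [← pw_succ, List.range_succ, List.map_append]; rfl,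
        ih (k + 1)]
      have he : k + 1 + tl.length = k + (tl.length + 1) := by omega
      rw [List.length_cons, he]
  have h0 := h s.toList 0
  simp only [List.range_zero, List.map_nil, pw, pow_zero, Nat.one_mod, Nat.zero_add] at h0
  rw [buildWeights, h0]
  simp [wl]

-- ---- initial vector and unit powers ----

lemma rget_init (x : ZMod 13) :
    rget ((List.replicate 13 (0 : Int)).set 0 1) x = if x = 0 then 1 else 0 := by
  revert x; decide

lemma mul_pow10_zero_iff (t : ZMod 13) (N : Nat) : t * 10 ^ N = 0 ↔ t = 0 := by
  constructor
  · intro h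
    calc t = t * (10 ^ N * 4 ^ N) := by
          rw [← mul_pow, show ((10 : ZMod 13) * 4) = 1 by decide, one_pow, mul_one]
      _ = (t * 10 ^ N) * 4 ^ N := by ring
      _ = 0 := by rw [h, zero_mul]
  · intro h; rw [h, zero_mul]

-- ---- main invariant ----

lemma main_inv (cs : List Char) (row cnt : List Int) (fixed : Nat)
    (hcnt : cnt.length = 13)
    (hbnd : ∀ t : ZMod 13, 0 ≤ rget cnt t ∧ rget cnt t < MODP)
    (hrel : ∀ t : ZMod 13,
      rget row t = rget cnt (t * (10 : ZMod 13) ^ cs.length - (fixed : ZMod 13))) :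
    ∀ t : ZMod 13,
      rget (cs.foldl rowStepA row) t
        = rget ((cs.zip (wl cs.length)).foldl stepB (fixed, cnt)).2
            (t - ((((cs.zip (wl cs.length)).foldl stepB (fixed, cnt)).1 : Nat) : ZMod 13)) := by
  induction cs generalizing row cnt fixed with
  | nil =>
    intro t
    simpa using hrel t
  | cons c rest ih =>
    have hlen : (c :: rest).length = rest.length + 1 := rfl
    rw [hlen, wl_succ]
    by_cases hc : c = '?'
    · subst hc
      rw [List.zip_cons_cons, List.foldl_cons, List.foldl_cons]
      have hpair : stepB (fixed, cnt) ('?', pw rest.length)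
          = (fixed, (stepB (fixed, cnt) ('?', pw rest.length)).2) := by
        rw [stepB]; simp
      rw [hpair]
      apply ih
      · exact stepB_q_len _ _ _
      · intro t
        rw [stepB_q_rget]
        constructor
        · exact Int.emod_nonneg _ MODP_pos.ne'
        · exact Int.emod_lt_of_pos _ MODP_pos
      · intro t
        rw [rowStepA_q_rget, stepB_q_rget]
        congr 1
        apply Finset.sum_congr rfl
        intro k _
        rw [hrel ((t - (k : ZMod 13)) * 4)]
        congr 1
        rw [pw_cast]
        calc (t - (k : ZMod 13)) * 4 * (10 : ZMod 13) ^ (rest.length + 1) - (fixed : ZMod 13)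
            = (t - (k : ZMod 13)) * ((4 : ZMod 13) * 10) * (10 : ZMod 13) ^ rest.length
              - (fixed : ZMod 13) := by rw [pow_succ]; ring_nf
          _ = t * (10 : ZMod 13) ^ rest.length - (fixed : ZMod 13)
              - (k : ZMod 13) * (10 : ZMod 13) ^ rest.length := by
                rw [show ((4 : ZMod 13) * 10) = 1 by decide]; ring
    · rw [List.zip_cons_cons, List.foldl_cons, List.foldl_cons]
      have hpair : stepB (fixed, cnt) (c, pw rest.length)
          = ((fixed + digitA c * pw rest.length) % 13, cnt) := by
        rw [stepB]; simp [hc]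
      rw [hpair]
      apply ih
      · exact hcnt
      · exact hbnd
      · intro t
        rw [rowStepA_d_rget _ _ hc, hrel ((t - (digitA c : ZMod 13)) * 4)]
        rw [Int.emod_eq_of_lt (hbnd _).1 (hbnd _).2]
        congr 1
        have hcast : (((fixed + digitA c * pw rest.length) % 13 : Nat) : ZMod 13)
            = (fixed : ZMod 13) + (digitA c : ZMod 13) * (10 : ZMod 13) ^ rest.length := by
          rw [ZMod.natCast_mod]
          push_cast [pw_cast]
          ring
        rw [hcast]
        calc (t - (digitA c : ZMod 13)) * 4 * (10 : ZMod 13) ^ (rest.length + 1)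
              - (fixed : ZMod 13)
            = (t - (digitA c : ZMod 13)) * ((4 : ZMod 13) * 10) * (10 : ZMod 13) ^ rest.length
              - (fixed : ZMod 13) := by rw [pow_succ]; ring
          _ = t * (10 : ZMod 13) ^ rest.length
              - ((fixed : ZMod 13) + (digitA c : ZMod 13) * (10 : ZMod 13) ^ rest.length) := by
              rw [show ((4 : ZMod 13) * 10) = 1 by decide]; ring

-- initial vector satisfies the invariant hypotheses
lemma init_bnd (t : ZMod 13) :
    0 ≤ rget ((List.replicate 13 (0 : Int)).set 0 1) t
      ∧ rget ((List.replicate 13 (0 : Int)).set 0 1) t < MODP := by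
  rw [rget_init]
  unfold MODP
  split <;> norm_num

lemma init_rel (N : Nat) (t : ZMod 13) :
    rget ((List.replicate 13 (0 : Int)).set 0 1) t
      = rget ((List.replicate 13 (0 : Int)).set 0 1)
          (t * (10 : ZMod 13) ^ N - ((0 : Nat) : ZMod 13)) := by
  rw [rget_init, rget_init]
  simp only [Nat.cast_zero, sub_zero]
  by_cases h : t = 0
  · rw [if_pos h, if_pos ((mul_pow10_zero_iff t N).2 h)]
  · rw [if_neg h, if_neg (fun hh => h ((mul_pow10_zero_iff t N).1 hh))]

-- ===== VERDICT (by name: the statement is the Claim_ definition above) =====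
theorem solve_spec : Claim_equal_solve := by
  unfold Claim_equal_solve
  intro s _ _
  unfold Spec_solve
  have h5 := main_inv s.toList ((List.replicate 13 (0 : Int)).set 0 1)
    ((List.replicate 13 (0 : Int)).set 0 1) 0 (by simp) init_bnd
    (init_rel s.toList.length) (5 : ZMod 13)
  rw [rget, rget, show ((5 : ZMod 13)).val = 5 from rfl] at h5
  set res := (s.toList.zip (wl s.toList.length)).foldl stepB
    (0, (List.replicate 13 (0 : Int)).set 0 1) with hres
  have hidx : ((5 - ((res.1 : Nat) : Int)) % 13).toNat
      = ((5 : ZMod 13) - ((res.1 : Nat) : ZMod 13)).val := by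
    have h := ZMod.val_intCast (n := 13) (5 - ((res.1 : Nat) : Int))
    have hc : ((5 - ((res.1 : Nat) : Int) : Int) : ZMod 13)
        = (5 : ZMod 13) - ((res.1 : Nat) : ZMod 13) := by push_cast; ring
    rw [hc] at h
    omega
  calc solve s = res.2.getD ((5 : ZMod 13) - ((res.1 : Nat) : ZMod 13)).val 0 := by
        rw [solve]; exact h5
    _ = solve_alt s := by
        simp only [solve_alt, buildWeights_eq, ← hres, hidx]
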